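-- pv_equiv track=rewrite | github.com/seolcu/ultimate-transcripter | src/ultimate_transcripter/pipeline.py | _longest_consecutive_word_run
-- ===== SOURCE A (Python) =====
-- def _longest_consecutive_word_run(words: list[str]) -> int:
--     if not words:
--         return 0
--
--     longest = 1
--     current = 1
--     for index in range(1, len(words)):
--         if words[index] == words[index - 1]:
--             current += 1
--             if current > longest:
--                 longest = current
--             continue
--         current = 1
--     return longest
-- ===== SOURCE B (Python) =====
-- def _longest_consecutive_word_run(words: list[str]) -> int:
--     # Two-pointer run scan: jump whole runs instead of a resetting counter.
--     best = 0
--     i = 0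
--     n = len(words)
--     while i < n:
--         w = words[i]
--         j = i + 1
--         while j < n and words[j] == w:
--             j += 1
--         best = max(best, j - i)
--         i = j
--     return best
-- ===== Notes on version B (the rewrite author's own statement) =====
-- stated objective: alternative
-- what changed: Replaces the resetting run counter with a two-pointer scan that advances over each maximal run at once and takes the max of run lengths (empty list falls out naturally as 0).
import Mathlib
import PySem

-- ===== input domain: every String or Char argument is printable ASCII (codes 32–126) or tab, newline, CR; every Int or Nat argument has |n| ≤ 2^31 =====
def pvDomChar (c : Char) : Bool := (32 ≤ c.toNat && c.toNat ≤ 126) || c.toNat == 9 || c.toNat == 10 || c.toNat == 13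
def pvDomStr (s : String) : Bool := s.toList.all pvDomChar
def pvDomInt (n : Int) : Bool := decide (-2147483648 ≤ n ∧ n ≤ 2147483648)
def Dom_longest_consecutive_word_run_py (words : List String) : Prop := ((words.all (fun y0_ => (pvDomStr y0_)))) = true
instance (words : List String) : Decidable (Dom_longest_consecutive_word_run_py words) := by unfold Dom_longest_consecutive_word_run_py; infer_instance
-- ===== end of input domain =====

-- B replaces A's resetting run counter with a two-pointer scan over maximal runs; alternative decomposition, same cost.

-- ===== PORT A =====
def longest_consecutive_word_run_py (words : List String) : Int :=
  if words = [] then 0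
  else
    ((PySem.List.pyRange 1 (PySem.List.len words) 1).foldl
      (fun (st : Int × Int) index =>
        if PySem.List.pyGetD words index "" = PySem.List.pyGetD words (index - 1) "" then
          (if st.2 + 1 > st.1 then st.2 + 1 else st.1, st.2 + 1)
        else (st.1, 1)) (1, 1)).1

-- ===== PORT B =====
-- inner while loop of Source B: advance j while j < n and words[j] == w
def pvInnerB (words : List String) (w : String) (j : Int) : Int :=
  if h : j < (words.length : Int) ∧ PySem.List.pyGetD words j "" = w then
    pvInnerB words w (j + 1)
  else j
termination_by ((words.length : Int) - j).toNat
decreasing_by omega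

-- needed for pvOuterB's termination: the inner loop never moves j backwards
theorem pvInnerB_ge (words : List String) (w : String) (j : Int) : j ≤ pvInnerB words w j := by
  unfold pvInnerB
  split
  · have := pvInnerB_ge words w (j + 1)
    omega
  · omega
termination_by ((words.length : Int) - j).toNat
decreasing_by omega

-- outer while loop of Source B
def pvOuterB (words : List String) (best i : Int) : Int :=
  if h : i < (words.length : Int) then
    pvOuterB words (max best (pvInnerB words (PySem.List.pyGetD words i "") (i + 1) - i))
      (pvInnerB words (PySem.List.pyGetD words i "") (i + 1))
  else best
termination_by ((words.length : Int) - i).toNat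
decreasing_by
  have := pvInnerB_ge words (PySem.List.pyGetD words i "") (i + 1)
  omega

def longest_consecutive_word_run_py_alt (words : List String) : Int :=
  pvOuterB words 0 0

-- ===== PRECONDITION & SPEC =====
def Spec_longest_consecutive_word_run_py (words : List String) (out : Int) : Prop := out = longest_consecutive_word_run_py_alt words
instance (words : List String) (out : Int) : Decidable (Spec_longest_consecutive_word_run_py words out) := by unfold Spec_longest_consecutive_word_run_py; infer_instance

-- ===== CLAIM (what is proved, stated in full; the proofs are below) =====
def Claim_equal_longest_consecutive_word_run_py : Prop := ∀ (words : List String), Dom_longest_consecutive_word_run_py words → Spec_longest_consecutive_word_run_py words (longest_consecutive_word_run_py words)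

-- ===== LEMMAS AND PROOFS =====

-- length of the maximal prefix run of value w
def pvRunLen (w : String) : List String → Nat
  | [] => 0
  | x :: xs => if x = w then pvRunLen w xs + 1 else 0

-- common reference value: the longest run length, by run-splitting
def pvSpec : List String → Int
  | [] => 0
  | w :: rest => max (1 + (pvRunLen w rest : Int)) (pvSpec (rest.drop (pvRunLen w rest)))
termination_by ws => ws.length
decreasing_by simp

theorem pvRunLen_le (w : String) (xs : List String) : pvRunLen w xs ≤ xs.length := by
  induction xs generalizing w with
  | nil => simp [pvRunLen]
  | cons x t ih =>
    simp only [pvRunLen, List.length_cons]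
    have := ih w
    split <;> omega

theorem pvSpec_nonneg (ws : List String) : 0 ≤ pvSpec ws := by
  cases ws with
  | nil => simp [pvSpec]
  | cons w rest => rw [pvSpec]; positivity

-- structural form of A's loop over adjacent pairs, carrying (longest, current)
def pvLoop (prev : String) : List String → (Int × Int) → (Int × Int)
  | [], st => st
  | x :: xs, st =>
      if x = prev then pvLoop x xs (if st.2 + 1 > st.1 then st.2 + 1 else st.1, st.2 + 1)
      else pvLoop x xs (st.1, 1)

theorem pvLoop_eq (prev : String) (xs : List String) (l c : Int)
    (hc : 1 ≤ c) (hl : c ≤ l) :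
    (pvLoop prev xs (l, c)).1
      = max l (max (c + pvRunLen prev xs) (pvSpec (xs.drop (pvRunLen prev xs)))) := by
  induction xs generalizing prev l c with
  | nil =>
    simp [pvLoop, pvRunLen, pvSpec]
    omega
  | cons x t ih =>
    by_cases hx : x = prev
    · subst hx
      simp only [pvLoop, pvRunLen, if_true, List.drop_succ_cons]
      rw [ih x (if c + 1 > l then c + 1 else l) (c + 1) (by omega) (by omega)]
      push_cast
      omega
    · simp only [pvLoop, pvRunLen, if_neg hx]
      rw [ih x l 1 (by omega) (by omega)]
      have hs : pvSpec (x :: t)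
          = max (1 + (pvRunLen x t : Int)) (pvSpec (t.drop (pvRunLen x t))) := by
        rw [pvSpec]
      simp only [List.drop_zero, Nat.cast_zero, hs]
      omega

-- bridge: A's pyRange-indexed fold equals pvLoop from position i
theorem pvBridgeA (words : List String) :
    ∀ (k i : Nat) (st : Int × Int), words.length - i ≤ k → 1 ≤ i → i ≤ words.length →
    (PySem.List.pyRange (i : Int) (words.length : Int) 1).foldl
      (fun (st : Int × Int) index =>
        if PySem.List.pyGetD words index "" = PySem.List.pyGetD words (index - 1) "" then
          (if st.2 + 1 > st.1 then st.2 + 1 else st.1, st.2 + 1)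
        else (st.1, 1)) st
      = pvLoop (PySem.List.pyGetD words ((i : Int) - 1) "") (words.drop i) st := by
  intro k
  induction k with
  | zero =>
    intro i st hk h1 h2
    have : i = words.length := by omega
    subst this
    rw [PySem.List.pyRange_one_eq_nil (by omega)]
    simp [pvLoop]
  | succ k ih =>
    intro i st hk h1 h2
    by_cases hlt : i < words.length
    · rw [PySem.List.pyRange_one_cons (by exact_mod_cast hlt)]
      simp only [List.foldl_cons]
      have hdrop : words.drop i = words[i] :: words.drop (i + 1) :=
        (List.getElem_cons_drop hlt).symm
      have hget : PySem.List.pyGetD words (i : Int) "" = words[i] := by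
        rw [PySem.List.pyGetD_eq_getElem _ _ (by omega) (by exact_mod_cast hlt)]
        simp
      have hcast : ((i : Int) + 1) = ((i + 1 : Nat) : Int) := by push_cast; ring
      rw [hcast, ih (i + 1) _ (by omega) (by omega) (by omega)]
      rw [hdrop]
      have hget' : PySem.List.pyGetD words (((i + 1 : Nat) : Int) - 1) "" = words[i] := by
        have : ((i + 1 : Nat) : Int) - 1 = (i : Int) := by push_cast; ring
        rw [this, hget]
      rw [hget']
      show pvLoop words[i] (words.drop (i + 1))
          (if PySem.List.pyGetD words (i : Int) "" = PySem.List.pyGetD words ((i : Int) - 1) "" then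
            (if st.2 + 1 > st.1 then st.2 + 1 else st.1, st.2 + 1) else (st.1, 1))
        = pvLoop (PySem.List.pyGetD words ((i : Int) - 1) "") (words[i] :: words.drop (i + 1)) st
      rw [hget]
      by_cases heq : words[i] = PySem.List.pyGetD words ((i : Int) - 1) ""
      · simp [pvLoop, heq]
      · simp [pvLoop, heq]
    · have : i = words.length := by omega
      subst this
      rw [PySem.List.pyRange_one_eq_nil (by omega)]
      simp [pvLoop]

-- A equals pvSpec
theorem pvA_eq_spec (words : List String) :
    longest_consecutive_word_run_py words = pvSpec words := by
  cases words with
  | nil => simp [longest_consecutive_word_run_py, pvSpec]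
  | cons w rest =>
    unfold longest_consecutive_word_run_py
    rw [if_neg (by simp)]
    have hb := pvBridgeA (w :: rest) (w :: rest).length 1 (1, 1) (by omega) (by omega)
      (by simp)
    simp only [PySem.List.len_eq, Nat.cast_one] at hb ⊢
    rw [hb]
    have hg : PySem.List.pyGetD (w :: rest) ((1 : Int) - 1) "" = w := by
      norm_num [PySem.List.pyGetD_zero_cons]
    rw [hg]
    simp only [List.drop_succ_cons, List.drop_zero]
    rw [pvLoop_eq w rest 1 1 le_rfl le_rfl]
    have hs : pvSpec (w :: rest)
        = max (1 + (pvRunLen w rest : Int)) (pvSpec (rest.drop (pvRunLen w rest))) := by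
      rw [pvSpec]
    rw [hs]
    have h0 := pvSpec_nonneg (rest.drop (pvRunLen w rest))
    have h1 : (0 : Int) ≤ pvRunLen w rest := by positivity
    omega

-- inner loop computes the end of the run
theorem pvInnerB_eq (words : List String) (w : String) :
    ∀ (k j : Nat), words.length - j ≤ k →
    pvInnerB words w (j : Int) = (j : Int) + pvRunLen w (words.drop j) := by
  intro k
  induction k with
  | zero =>
    intro j hk
    have hge : words.length ≤ j := by omega
    rw [pvInnerB]
    rw [dif_neg (by omega)]
    rw [List.drop_eq_nil_of_le hge]
    simp [pvRunLen]
  | succ k ih =>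
    intro j hk
    by_cases hlt : j < words.length
    · have hdrop : words.drop j = words[j] :: words.drop (j + 1) :=
        (List.getElem_cons_drop hlt).symm
      have hget : PySem.List.pyGetD words (j : Int) "" = words[j] := by
        rw [PySem.List.pyGetD_eq_getElem _ _ (by omega) (by exact_mod_cast hlt)]
        simp
      rw [pvInnerB]
      by_cases heq : words[j] = w
      · rw [dif_pos ⟨by exact_mod_cast hlt, by rw [hget, heq]⟩]
        have hcast : ((j : Int) + 1) = ((j + 1 : Nat) : Int) := by push_cast; ring
        rw [hcast, ih (j + 1) (by omega)]
        rw [hdrop]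
        simp only [pvRunLen, if_pos heq]
        push_cast
        ring
      · rw [dif_neg (by rw [hget]; tauto)]
        rw [hdrop]
        simp [pvRunLen, heq]
    · rw [pvInnerB, dif_neg (by omega)]
      rw [List.drop_eq_nil_of_le (by omega)]
      simp [pvRunLen]

-- outer loop computes max best (longest run in the suffix)
theorem pvOuterB_eq (words : List String) :
    ∀ (k i : Nat) (best : Int), words.length - i ≤ k → 0 ≤ best →
    pvOuterB words best (i : Int) = max best (pvSpec (words.drop i)) := by
  intro k
  induction k with
  | zero =>
    intro i best hk hb
    rw [pvOuterB, dif_neg (by omega)]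
    rw [List.drop_eq_nil_of_le (by omega)]
    simp [pvSpec]
    omega
  | succ k ih =>
    intro i best hk hb
    by_cases hlt : i < words.length
    · have hdrop : words.drop i = words[i] :: words.drop (i + 1) :=
        (List.getElem_cons_drop hlt).symm
      have hget : PySem.List.pyGetD words (i : Int) "" = words[i] := by
        rw [PySem.List.pyGetD_eq_getElem _ _ (by omega) (by exact_mod_cast hlt)]
        simp
      rw [pvOuterB, dif_pos (by exact_mod_cast hlt)]
      have hcast : ((i : Int) + 1) = ((i + 1 : Nat) : Int) := by push_cast; ring
      set r := pvRunLen words[i] (words.drop (i + 1)) with hr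
      have hinner : pvInnerB words (PySem.List.pyGetD words (i : Int) "") ((i : Int) + 1)
          = ((i + 1 + r : Nat) : Int) := by
        rw [hget, hcast, pvInnerB_eq words words[i] (words.length - (i + 1)) (i + 1) (by omega)]
        push_cast; ring
      rw [hinner]
      have hrle : r ≤ (words.drop (i + 1)).length := pvRunLen_le _ _
      rw [ih (i + 1 + r) _ (by simp at hrle; omega) (by positivity)]
      have hdd : words.drop (i + 1 + r) = (words.drop (i + 1)).drop r := by
        rw [List.drop_drop]
      rw [hdd, hdrop]
      rw [show pvSpec (words[i] :: words.drop (i + 1))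
          = max (1 + (r : Int)) (pvSpec ((words.drop (i + 1)).drop r)) from by
        rw [pvSpec, ← hr]]
      have h0 := pvSpec_nonneg ((words.drop (i + 1)).drop r)
      push_cast
      omega
    · rw [pvOuterB, dif_neg (by omega)]
      rw [List.drop_eq_nil_of_le (by omega)]
      simp [pvSpec]
      omega

theorem pvB_eq_spec (words : List String) :
    longest_consecutive_word_run_py_alt words = pvSpec words := by
  unfold longest_consecutive_word_run_py_alt
  have := pvOuterB_eq words words.length 0 0 (by omega) (by omega)
  norm_num at this
  rw [this]
  have := pvSpec_nonneg words
  omega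

-- ===== VERDICT (by name: the statement is the Claim_ definition above) =====
theorem longest_consecutive_word_run_py_spec : Claim_equal_longest_consecutive_word_run_py := by
  intro words _
  unfold Spec_longest_consecutive_word_run_py
  rw [pvA_eq_spec, pvB_eq_spec]
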